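-- pv_equiv track=rewrite | github.com/fabricio54/compilador | src/my_parser.py | is_infix
-- ===== SOURCE A (Python) =====
-- def is_infix(expression):
--     def is_valid_infix(tokens):
--         operand_expected = True
--         for token in tokens:
--             if token in operators:
--                 if operand_expected:
--                     return False
--                 operand_expected = True
--             elif token.isdigit():
--                 if not operand_expected:
--                     return False
--                 operand_expected = False
--             else:
--                 return False
--         return not operand_expected
--
--     operators = set(['+', '-', '*', '/'])
--     tokens = expression.split()
--
--     # A expressão infixa deve ter mais de dois tokens
--     if len(tokens) < 3:
--         return False
--
--     return is_valid_infix(tokens)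
-- ===== SOURCE B (Python) =====
-- def is_infix(expression):
--     operators = {'+', '-', '*', '/'}
--     tokens = expression.split()
--     if len(tokens) < 3 or len(tokens) % 2 == 0:
--         return False
--     return (all(t.isdigit() for t in tokens[::2])
--             and all(t in operators for t in tokens[1::2]))
-- ===== Notes on version B (the rewrite author's own statement) =====
-- stated objective: simpler
-- what changed: Replaced A's stateful operand_expected alternation scan (with early returns) by a stateless positional check: length must be >= 3 and odd, every even-position token isdigit, every odd-position token an operator, tested on the two stride-2 slices.
import Mathlib
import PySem

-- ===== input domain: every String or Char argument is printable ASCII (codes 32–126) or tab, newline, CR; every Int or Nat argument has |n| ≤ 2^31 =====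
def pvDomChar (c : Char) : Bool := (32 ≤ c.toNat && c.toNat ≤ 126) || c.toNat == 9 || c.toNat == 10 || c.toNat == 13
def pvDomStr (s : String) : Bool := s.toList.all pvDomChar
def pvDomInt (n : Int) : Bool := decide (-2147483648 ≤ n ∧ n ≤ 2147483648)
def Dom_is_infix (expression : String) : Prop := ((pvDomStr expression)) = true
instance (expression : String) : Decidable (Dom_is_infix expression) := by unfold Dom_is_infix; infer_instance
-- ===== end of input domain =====

-- B replaces A's stateful alternation scan by a stateless parity/slice check; objective: simpler.

-- ===== PORT A =====
def pvOpsA : PySem.Set String := PySem.Set.ofList ["+", "-", "*", "/"]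

-- A's inner is_valid_infix: loop over tokens with the operand_expected flag, early returns as base cases
def pvValidA : List String → Bool → Bool
  | [], operandExpected => !operandExpected
  | t :: ts, operandExpected =>
    if PySem.Set.contains pvOpsA t then
      if operandExpected then false else pvValidA ts true
    else if PySem.Str.strIsdigit t then
      if !operandExpected then false else pvValidA ts false
    else false

def is_infix (expression : String) : Bool :=
  let tokens := PySem.Str.split₀ expression
  if tokens.length < 3 then false
  else pvValidA tokens true

-- ===== PORT B =====
def pvOpsB : PySem.Set String := PySem.Set.ofList ["+", "-", "*", "/"]

-- step-2 slices never raise (step ≠ 0), so slice? is always `some`; getD [] is exact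
def is_infix_alt (expression : String) : Bool :=
  let tokens := PySem.Str.split₀ expression
  if tokens.length < 3 || tokens.length % 2 == 0 then false
  else
    ((PySem.List.slice? tokens none none 2).getD []).all PySem.Str.strIsdigit
      && ((PySem.List.slice? tokens (some 1) none 2).getD []).all (PySem.Set.contains pvOpsB)

-- ===== PRECONDITION & SPEC =====
def Spec_is_infix (expression : String) (out : Bool) : Prop := out = is_infix_alt expression
instance (expression : String) (out : Bool) : Decidable (Spec_is_infix expression out) := by unfold Spec_is_infix; infer_instance

-- ===== CLAIM (what is proved, stated in full; the proofs are below) =====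
def Claim_equal_is_infix : Prop := ∀ (expression : String), Dom_is_infix expression → Spec_is_infix expression (is_infix expression)

-- ===== LEMMAS AND PROOFS =====

-- elements at even / odd positions
mutual
def pvEvens {α : Type} : List α → List α
  | [] => []
  | x :: ts => x :: pvOdds ts
def pvOdds {α : Type} : List α → List α
  | [] => []
  | _ :: ts => pvEvens ts
end

def pvValidA_char_ind {α : Type} {motive : List α → Prop}
    (nil : motive [])
    (single : ∀ t, motive [t])
    (pair : ∀ t u ts, motive ts → motive (t :: u :: ts)) :
    ∀ ts, motive ts
  | [] => nil
  | [t] => single t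
  | t :: u :: ts => pair t u ts (pvValidA_char_ind nil single pair ts)

theorem fm_evens {α : Type} (xs : List α) :
    List.filterMap (fun k => xs[2 * k]?) (List.range ((xs.length + 1) / 2)) = pvEvens xs := by
  induction xs using pvValidA_char_ind with
  | nil => simp [pvEvens]
  | single x => simp [pvEvens, pvOdds, List.range_succ]
  | pair x y ts ih =>
      have hc : ((x :: y :: ts).length + 1) / 2 = (ts.length + 1) / 2 + 1 := by
        simp; omega
      rw [hc, List.range_succ_eq_map, List.filterMap_cons, List.filterMap_map]
      have hidx : ∀ k : ℕ, ((x :: y :: ts)[2 * k.succ]?) = ts[2 * k]? := by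
        intro k
        rw [show 2 * k.succ = (2 * k) + 1 + 1 from by omega]
        simp
      simp only [Function.comp_def, hidx]
      simp [pvEvens, pvOdds, ih]

theorem fm_odds {α : Type} (xs : List α) :
    List.filterMap (fun k => xs[2 * k + 1]?) (List.range (xs.length / 2)) = pvOdds xs := by
  cases xs with
  | nil => simp [pvOdds]
  | cons x ts =>
      have hc : (x :: ts).length / 2 = (ts.length + 1) / 2 := by simp
      have hidx : ∀ k : ℕ, ((x :: ts)[2 * k + 1]?) = ts[2 * k]? := by
        intro k; simp
      rw [hc]
      simp only [hidx]
      rw [fm_evens ts]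
      simp [pvOdds]

theorem sliceE {α : Type} (xs : List α) :
    PySem.List.slice? xs none none 2 = some (pvEvens xs) := by
  rw [PySem.List.slice?, PySem.List.sliceIndices]
  norm_num
  have hc : (if 0 < xs.length then (((xs.length:ℤ) + 2 - 1) / 2).toNat else 0)
      = (xs.length + 1) / 2 := by
    split_ifs <;> omega
  have hidx : ∀ k : ℕ, ((2:ℤ) * ↑k).toNat = 2 * k := by intro k; omega
  simp only [hc, hidx]
  exact fm_evens xs

theorem sliceO {α : Type} (xs : List α) :
    PySem.List.slice? xs (some 1) none 2 = some (pvOdds xs) := by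
  cases xs with
  | nil => simp [PySem.List.slice?, PySem.List.sliceIndices, pvOdds]
  | cons x ts =>
      rw [PySem.List.slice?, PySem.List.sliceIndices]
      norm_num
      have hc : (if 0 < ts.length then (((ts.length:ℤ) + 2 - 1) / 2).toNat else 0)
          = (ts.length + 1) / 2 := by
        split_ifs <;> omega
      have hidx : ∀ k : ℕ, ((1:ℤ) + 2 * ↑k).toNat = 2 * k + 1 := by intro k; omega
      simp only [hc, hidx]
      have := fm_odds (x :: ts)
      simpa using this

theorem ops_not_digit (t : String) (h : t ∈ pvOpsA) :
    PySem.Chars.strIsdigit t.toList = false := by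
  have hl : pvOpsA = ["+", "-", "*", "/"] := by decide
  rw [hl] at h
  simp only [List.mem_cons, List.not_mem_nil, or_false] at h
  rcases h with h | h | h | h <;> subst h <;> decide

theorem validA_char (ts : List String) :
    pvValidA ts true =
      ((decide (ts.length % 2 = 1)) && (pvEvens ts).all PySem.Str.strIsdigit
        && (pvOdds ts).all (PySem.Set.contains pvOpsA)) := by
  induction ts using pvValidA_char_ind with
  | nil => simp [pvValidA, pvEvens]
  | single t =>
      by_cases hop : t ∈ pvOpsA
      · simp [pvValidA, pvEvens, pvOdds, hop, ops_not_digit t hop]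
      · by_cases hd : PySem.Chars.strIsdigit t.toList = true <;>
          simp [pvValidA, pvEvens, pvOdds, hop, hd]
  | pair t u ts ih =>
      have hpar : ((ts.length + 1 + 1) % 2 = 1) = (ts.length % 2 = 1) := by
        rw [eq_iff_iff]; omega
      by_cases hop : t ∈ pvOpsA
      · simp [pvValidA, pvEvens, pvOdds, hop, ops_not_digit t hop]
      · by_cases hd : PySem.Chars.strIsdigit t.toList = true
        · by_cases huop : u ∈ pvOpsA
          · simp [pvValidA, pvEvens, pvOdds, hop, hd, huop, ih, hpar,
              Bool.and_comm, Bool.and_assoc]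
          · by_cases hud : PySem.Chars.strIsdigit u.toList = true <;>
              simp [pvValidA, pvEvens, pvOdds, hop, hd, huop, hud]
        · simp at hd
          simp [pvValidA, pvEvens, pvOdds, hop, hd]

-- ===== VERDICT (by name: the statement is the Claim_ definition above) =====
theorem is_infix_spec : Claim_equal_is_infix := by
  intro e _
  unfold Spec_is_infix is_infix is_infix_alt
  simp only [sliceE, sliceO, Option.getD_some]
  set ts := PySem.Str.split₀ e with hts
  by_cases h3 : ts.length < 3
  · simp [h3]
  · simp only [h3, if_false, Bool.false_or, decide_false]
    rw [validA_char]
    show _ = (if _ then false else _)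
    by_cases hev : ts.length % 2 = 0
    · simp [hev]
    · have : ts.length % 2 = 1 := by omega
      simp [this, pvOpsA, pvOpsB]
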